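-- pv_equiv track=rewrite | github.com/htang7415/Max-Handbook | modules/databases/nosql/tenant-hotspot-mitigation/python/tenant_hotspot_mitigation.py | shard_loads
-- ===== SOURCE A (Python) =====
-- def stable_shard(value: str, shard_count: int) -> int:
--     if shard_count <= 0:
--         raise ValueError("shard_count must be positive")
--     stable_hash = sum((index + 1) * ord(char) for index, char in enumerate(value))
--     return stable_hash % shard_count
--
-- def route_row(
--     tenant_id: str,
--     row_id: str,
--     shard_count: int,
--     split_tenants: dict[str, int] | None = None,
-- ) -> int:
--     split_count = 1 if split_tenants is None else int(split_tenants.get(tenant_id, 1))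
--     if split_count <= 1:
--         return stable_shard(tenant_id, shard_count)
--     base_shard = stable_shard(tenant_id, shard_count)
--     bucket = stable_shard(row_id, split_count)
--     return (base_shard + bucket) % shard_count
--
-- def shard_loads(
--     rows: list[dict[str, object]],
--     shard_count: int,
--     split_tenants: dict[str, int] | None = None,
-- ) -> dict[int, int]:
--     loads = {shard_id: 0 for shard_id in range(shard_count)}
--     for row in rows:
--         tenant_id = str(row["tenant_id"])
--         row_id = str(row["row_id"])
--         weight = int(row.get("weight", 1))
--         shard_id = route_row(tenant_id, row_id, shard_count, split_tenants)
--         loads[shard_id] += weight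
--     return loads
-- ===== SOURCE B (Python) =====
-- def stable_shard(value: str, shard_count: int) -> int:
--     if shard_count <= 0:
--         raise ValueError("shard_count must be positive")
--     return sum((index + 1) * ord(char) for index, char in enumerate(value)) % shard_count
--
-- def _routed(row, shard_count, split_tenants):
--     tenant_id = str(row["tenant_id"])
--     split_count = 1 if split_tenants is None else int(split_tenants.get(tenant_id, 1))
--     if split_count <= 1:
--         shard = stable_shard(tenant_id, shard_count)
--     else:
--         shard = (stable_shard(tenant_id, shard_count)
--                  + stable_shard(str(row["row_id"]), split_count)) % shard_count
--     return shard, int(row.get("weight", 1))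
--
-- def shard_loads(rows, shard_count, split_tenants=None):
--     routed = [_routed(row, shard_count, split_tenants) for row in rows]
--     return {s: sum(w for t, w in routed if t == s) for s in range(shard_count)}
-- ===== Notes on version B (the rewrite author's own statement) =====
-- stated objective: alternative
-- what changed: A accumulates weights row by row into a pre-seeded mutable dict; B first routes every row to a (shard, weight) pair in one pass and then builds the result as a per-shard comprehension summing the matching weights over range(shard_count).
import Mathlib
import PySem

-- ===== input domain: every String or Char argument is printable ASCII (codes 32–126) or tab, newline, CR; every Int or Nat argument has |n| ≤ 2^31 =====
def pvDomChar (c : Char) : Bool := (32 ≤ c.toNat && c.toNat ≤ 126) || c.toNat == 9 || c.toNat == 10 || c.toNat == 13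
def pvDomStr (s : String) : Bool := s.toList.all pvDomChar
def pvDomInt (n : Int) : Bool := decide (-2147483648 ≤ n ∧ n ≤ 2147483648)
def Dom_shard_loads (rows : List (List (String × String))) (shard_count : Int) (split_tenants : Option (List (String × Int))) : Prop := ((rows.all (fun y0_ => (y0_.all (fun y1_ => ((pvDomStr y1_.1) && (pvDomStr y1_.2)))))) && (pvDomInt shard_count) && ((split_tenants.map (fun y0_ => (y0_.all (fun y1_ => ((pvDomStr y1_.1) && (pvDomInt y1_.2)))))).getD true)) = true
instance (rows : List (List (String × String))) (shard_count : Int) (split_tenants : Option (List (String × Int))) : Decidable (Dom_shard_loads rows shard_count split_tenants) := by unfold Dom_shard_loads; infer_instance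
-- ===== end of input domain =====

-- B replaces A's row-by-row accumulation into a pre-seeded dict by one routing pass
-- producing (shard, weight) pairs followed by a per-shard summation over range(shard_count);
-- objective: alternative decomposition (not claimed faster).

-- ===== PORT A =====
-- Pre_shard_loads excludes exactly the raising inputs (shard_count ≤ 0 with nonempty rows,
-- a row missing "tenant_id"/"row_id", an unparsable "weight"); the .getD fallbacks and the
-- total `modify` below are unreached/exact under Pre_.
def stableShard (value : String) (shardCount : Int) : Int :=
  PySem.Int.mod (((PySem.List.enumerate value.toList 0).map
    (fun p => (p.1 + 1) * (p.2.toNat : Int))).sum) shardCount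

def routeRow (tenantId rowId : String) (shardCount : Int)
    (splitTenants : Option (List (String × Int))) : Int :=
  let splitCount : Int := match splitTenants with
    | none => 1
    | some d => (PySem.Dict.mk d).getD tenantId 1
  if splitCount ≤ 1 then stableShard tenantId shardCount
  else PySem.Int.mod (stableShard tenantId shardCount + stableShard rowId splitCount) shardCount

def shard_loads (rows : List (List (String × String))) (shard_count : Int) (split_tenants : Option (List (String × Int))) : List (Int × Int) :=
  let loads : PySem.Dict Int Int :=
    (PySem.List.pyRange 0 shard_count 1).foldl (fun d s => d.insert s 0) PySem.Dict.empty
  (rows.foldl (fun d row =>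
      let tenantId := ((PySem.Dict.mk row).get? "tenant_id").getD ""
      let rowId := ((PySem.Dict.mk row).get? "row_id").getD ""
      let weight : Int := match (PySem.Dict.mk row).get? "weight" with
        | some s => (PySem.Int.ofStr? s).getD 0
        | none => 1
      let shardId := routeRow tenantId rowId shard_count split_tenants
      -- loads[shard_id] += weight; shardId is a key of loads under Pre_, so modify is exact
      d.modify shardId 0 (· + weight)) loads).items

-- ===== PORT B =====
def stableShardAlt (value : String) (shardCount : Int) : Int :=
  PySem.Int.mod (((PySem.List.enumerate value.toList 0).map
    (fun p => (p.1 + 1) * (p.2.toNat : Int))).sum) shardCount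

def routedPair (row : List (String × String)) (shardCount : Int)
    (splitTenants : Option (List (String × Int))) : Int × Int :=
  let tenantId := ((PySem.Dict.mk row).get? "tenant_id").getD ""
  let splitCount : Int := match splitTenants with
    | none => 1
    | some d => (PySem.Dict.mk d).getD tenantId 1
  let shard := if splitCount ≤ 1 then stableShardAlt tenantId shardCount
    else PySem.Int.mod (stableShardAlt tenantId shardCount +
      stableShardAlt (((PySem.Dict.mk row).get? "row_id").getD "") splitCount) shardCount
  (shard, match (PySem.Dict.mk row).get? "weight" with
    | some s => (PySem.Int.ofStr? s).getD 0
    | none => 1)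

def shard_loads_alt (rows : List (List (String × String))) (shard_count : Int) (split_tenants : Option (List (String × Int))) : List (Int × Int) :=
  let routed := rows.map (fun row => routedPair row shard_count split_tenants)
  (PySem.List.pyRange 0 shard_count 1).map
    (fun s => (s, ((routed.filter (fun p => p.1 == s)).map (·.2)).sum))

-- ===== PRECONDITION & SPEC =====
-- Pre_ excludes exactly the inputs where Python A raises: shard_count ≤ 0 with a nonempty
-- rows list (ValueError), a row without "tenant_id" or "row_id" (KeyError), or a "weight"
-- string int() rejects (ValueError).
def Pre_shard_loads (rows : List (List (String × String))) (shard_count : Int) (split_tenants : Option (List (String × Int))) : Prop :=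
  (rows = [] ∨ 0 < shard_count) ∧
  rows.all (fun row =>
    ((PySem.Dict.mk row).get? "tenant_id").isSome &&
    ((PySem.Dict.mk row).get? "row_id").isSome &&
    (match (PySem.Dict.mk row).get? "weight" with
      | some s => (PySem.Int.ofStr? s).isSome
      | none => true)) = true
instance (rows : List (List (String × String))) (shard_count : Int) (split_tenants : Option (List (String × Int))) : Decidable (Pre_shard_loads rows shard_count split_tenants) := by unfold Pre_shard_loads; infer_instance

def pvWitness_shard_loads : (List (List (String × String))) × Int × (Option (List (String × Int))) :=
  ([[("tenant_id", "a"), ("row_id", "r"), ("weight", "3")]], 2, some [("a", 2)])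

def Spec_shard_loads (rows : List (List (String × String))) (shard_count : Int) (split_tenants : Option (List (String × Int))) (out : List (Int × Int)) : Prop := out = shard_loads_alt rows shard_count split_tenants
instance (rows : List (List (String × String))) (shard_count : Int) (split_tenants : Option (List (String × Int))) (out : List (Int × Int)) : Decidable (Spec_shard_loads rows shard_count split_tenants out) := by unfold Spec_shard_loads; infer_instance

-- ===== CLAIM (what is proved, stated in full; the proofs are below) =====
def Claim_equal_shard_loads : Prop := ∀ (rows : List (List (String × String))) (shard_count : Int) (split_tenants : Option (List (String × Int))), Dom_shard_loads rows shard_count split_tenants → Pre_shard_loads rows shard_count split_tenants → Spec_shard_loads rows shard_count split_tenants (shard_loads rows shard_count split_tenants)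

-- ===== LEMMAS AND PROOFS =====

-- the accumulation loop, read off pointwise
theorem getD_fold_add (ps : List (Int × Int)) (d : PySem.Dict Int Int) (v : Int) :
    (ps.foldl (fun d p => d.modify p.1 0 (· + p.2)) d).getD v 0
      = d.getD v 0 + ((ps.filter (fun p => p.1 == v)).map (·.2)).sum := by
  induction ps generalizing d with
  | nil => simp
  | cons p ps ih =>
    simp only [List.foldl_cons, ih, PySem.Dict.getD_modify, List.filter_cons]
    by_cases h : v = p.1
    · simp [h, List.sum_cons]; ring
    · have hb : (p.1 == v) = false := by simp; exact fun hc => h hc.symm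
      simp [h, hb]

-- items of a nodup-keyed dict are keys paired with their getD values
theorem items_eq_keys_map (d : PySem.Dict Int Int) (h : d.keys.Nodup) :
    d.items = d.keys.map (fun k => (k, d.getD k 0)) := by
  simp only [PySem.Dict.keys, List.map_map]
  have hcongr : ∀ p ∈ d.items, ((fun k => (k, d.getD k 0)) ∘ (fun x : Int × Int => x.1)) p = id p := by
    intro p hp
    have := PySem.Dict.getD_of_mem_items (d := d) (k := p.1) (v := p.2) (d0 := 0) (by exact hp) h
    simp [this]
  rw [List.map_congr_left hcongr, List.map_id]

theorem update_self_of_subset (s : PySem.Set Int) (xs : List Int)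
    (h : ∀ x ∈ xs, x ∈ s) : PySem.Set.update s xs = s := by
  rw [PySem.Set.update_eq_append_filter]
  have hf : List.filter (fun y => !(PySem.Set.contains s y)) (PySem.Set.ofList xs) = [] := by
    apply List.filter_eq_nil_iff.mpr
    intro a ha
    have hmem : a ∈ s := h a ((PySem.Set.mem_ofList xs a).1 ha)
    simpa using hmem
  rw [hf, List.append_nil]

-- ===== VERDICT (by name: the statement is the Claim_ definition above) =====
theorem shard_loads_spec : Claim_equal_shard_loads := by
  intro rows n st _ hpre
  unfold Spec_shard_loads
  set ps : List (Int × Int) := rows.map (fun row => routedPair row n st) with hps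
  show (rows.foldl (fun d row =>
      let tenantId := ((PySem.Dict.mk row).get? "tenant_id").getD ""
      let rowId := ((PySem.Dict.mk row).get? "row_id").getD ""
      let weight : Int := match (PySem.Dict.mk row).get? "weight" with
        | some s => (PySem.Int.ofStr? s).getD 0
        | none => 1
      let shardId := routeRow tenantId rowId n st
      d.modify shardId 0 (· + weight))
      ((PySem.List.pyRange 0 n 1).foldl (fun d s => d.insert s 0) PySem.Dict.empty)).items
    = (PySem.List.pyRange 0 n 1).map
        (fun s => (s, ((ps.filter (fun p => p.1 == s)).map (fun x => x.2)).sum))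
  -- A's per-row body is exactly "modify at routedPair"
  have hbody : (rows.foldl (fun d row =>
      let tenantId := ((PySem.Dict.mk row).get? "tenant_id").getD ""
      let rowId := ((PySem.Dict.mk row).get? "row_id").getD ""
      let weight : Int := match (PySem.Dict.mk row).get? "weight" with
        | some s => (PySem.Int.ofStr? s).getD 0
        | none => 1
      let shardId := routeRow tenantId rowId n st
      d.modify shardId 0 (· + weight))
      ((PySem.List.pyRange 0 n 1).foldl (fun d s => d.insert s 0) PySem.Dict.empty))
      = ps.foldl (fun d p => d.modify p.1 0 (· + p.2))
        ((PySem.List.pyRange 0 n 1).foldl (fun d s => d.insert s 0) PySem.Dict.empty) := by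
    rw [hps, List.foldl_map]
    rfl
  rw [hbody]
  set loads : PySem.Dict Int Int :=
    (PySem.List.pyRange 0 n 1).foldl (fun d s => d.insert s 0) PySem.Dict.empty with hloads
  -- the seed dict: items, keys, values
  have hitems0 : loads.items = (PySem.List.pyRange 0 n 1).map (fun s => (s, (0 : Int))) := by
    rw [hloads]
    have := PySem.Dict.items_foldl_insert_fresh (l := PySem.List.pyRange 0 n 1)
      (k := fun s => s) (v := fun _ => (0 : Int)) (d := PySem.Dict.empty)
      (by intro a _; simp [PySem.Dict.contains_empty])
      (by simpa using PySem.List.nodup_pyRange_one 0 n)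
    simpa using this
  have hkeys0 : loads.keys = PySem.List.pyRange 0 n 1 := by
    have hmap := congrArg (List.map (fun p : Int × Int => p.1)) hitems0
    simp only [List.map_map] at hmap
    rw [show ((fun p : Int × Int => p.1) ∘ fun s : Int => (s, (0 : Int))) = id from rfl,
      List.map_id] at hmap
    exact hmap
  have hgetD0 : ∀ k : Int, loads.getD k 0 = 0 := by
    intro k
    rw [PySem.Dict.getD_eq_get?_getD]
    cases hg : loads.get? k with
    | none => simp
    | some v =>
      have hmem := PySem.Dict.mem_items_of_get?_eq_some (d := loads) (k := k) (v := v) hg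
      rw [hitems0] at hmem
      obtain ⟨s, _, hsv⟩ := List.mem_map.1 hmem
      injection hsv with h1 h2
      simp [← h2]
  have hnodup0 : loads.keys.Nodup := by rw [hkeys0]; exact PySem.List.nodup_pyRange_one 0 n
  -- every routed shard is a key of loads
  have hmemkeys : ∀ x ∈ ps.map (·.1), x ∈ loads.keys := by
    intro x hx
    obtain ⟨p, hp, rfl⟩ := List.mem_map.1 hx
    obtain ⟨row, hrow, rfl⟩ := List.mem_map.1 hp
    have hn : 0 < n := by
      rcases hpre.1 with h | h
      · exact absurd (h ▸ hrow) (List.not_mem_nil)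
      · exact h
    rw [hkeys0, PySem.List.mem_pyRange_one]
    show 0 ≤ (routedPair row n st).1 ∧ (routedPair row n st).1 < n
    unfold routedPair
    dsimp only
    split
    all_goals split
    all_goals exact ⟨PySem.Int.mod_nonneg _ hn, PySem.Int.mod_lt _ hn⟩
  set final := ps.foldl (fun d p => d.modify p.1 0 (· + p.2)) loads with hfinal
  have hkeysF : final.keys = PySem.List.pyRange 0 n 1 := by
    rw [hfinal, PySem.Dict.keys_foldl_modify_key, update_self_of_subset _ _ hmemkeys, hkeys0]
  have hnodupF : final.keys.Nodup := by rw [hkeysF]; exact PySem.List.nodup_pyRange_one 0 n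
  rw [items_eq_keys_map final hnodupF, hkeysF]
  refine List.map_congr_left ?_
  intro s _
  rw [hfinal, getD_fold_add, hgetD0]
  simp
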